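-- pv_equiv track=rewrite | github.com/AriqHibatullah/StatPub-Checker | suggest.py | is_adjacent_transposition
-- ===== SOURCE A (Python) =====
-- def is_adjacent_transposition(a: str, b: str) -> bool:
--     if len(a) != len(b):
--         return False
--     diffs = [(i, x, y) for i, (x, y) in enumerate(zip(a, b)) if x != y]
--     if len(diffs) != 2:
--         return False
--     (i1, x1, y1), (i2, x2, y2) = diffs
--     return i2 == i1 + 1 and x1 == y2 and x2 == y1
-- ===== SOURCE B (Python) =====
-- def is_adjacent_transposition(a: str, b: str) -> bool:
--     # single pass: find the first mismatch, then check the swap directly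
--     if len(a) != len(b):
--         return False
--     n = len(a)
--     i = 0
--     while i < n and a[i] == b[i]:
--         i += 1
--     if i + 1 >= n:
--         return False
--     return a[i] == b[i + 1] and a[i + 1] == b[i] and a[i + 2:] == b[i + 2:]
-- ===== Notes on version B (the rewrite author's own statement) =====
-- stated objective: alternative
-- what changed: B scans once to the first mismatch and immediately verifies the crossed pair and that the remaining tails are equal (early exit), instead of materialising the full list of differing positions and analysing it.
import Mathlib
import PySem

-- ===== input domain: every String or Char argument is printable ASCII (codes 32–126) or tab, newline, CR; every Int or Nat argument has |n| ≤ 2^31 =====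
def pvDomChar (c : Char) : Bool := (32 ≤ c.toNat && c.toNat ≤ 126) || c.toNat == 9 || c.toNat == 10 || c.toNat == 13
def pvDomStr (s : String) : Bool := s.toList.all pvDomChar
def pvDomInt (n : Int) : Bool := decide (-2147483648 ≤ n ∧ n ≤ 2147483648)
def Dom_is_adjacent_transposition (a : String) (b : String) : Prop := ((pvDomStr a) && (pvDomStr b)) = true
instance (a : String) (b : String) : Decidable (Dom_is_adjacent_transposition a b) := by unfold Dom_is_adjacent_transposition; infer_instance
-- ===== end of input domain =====

-- B finds the first mismatch in one pass and checks the crossed pair and equal tails directly,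
-- instead of collecting all differing positions and analysing the list (objective: alternative).


-- ===== PORT A =====
-- the final pattern-match of A: exactly two diffs, adjacent, crossed
def pvACheck : List (Int × Char × Char) → Bool
  | [(i1, x1, y1), (i2, x2, y2)] => i2 == i1 + 1 && x1 == y2 && x2 == y1
  | _ => false

def is_adjacent_transposition (a : String) (b : String) : Bool :=
  if a.toList.length != b.toList.length then false
  else
    pvACheck ((PySem.List.enumerate (a.toList.zip b.toList) 0).filter
      (fun p => p.2.1 != p.2.2))

-- ===== PORT B =====
-- the while loop of Source B (skip equal prefix) fused with its final check:
-- at the first mismatch check the crossed pair and that the tails a[i+2:] == b[i+2:] agree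
def pvAltCore : List Char → List Char → Bool
  | x :: xs, y :: ys =>
      if x == y then pvAltCore xs ys
      else
        match xs, ys with
        | x2 :: xs2, y2 :: ys2 => x == y2 && x2 == y && xs2 == ys2
        | _, _ => false
  | _, _ => false

def is_adjacent_transposition_alt (a : String) (b : String) : Bool :=
  if a.toList.length != b.toList.length then false
  else pvAltCore a.toList b.toList

-- ===== PRECONDITION & SPEC =====
def Spec_is_adjacent_transposition (a : String) (b : String) (out : Bool) : Prop := out = is_adjacent_transposition_alt a b
instance (a : String) (b : String) (out : Bool) : Decidable (Spec_is_adjacent_transposition a b out) := by unfold Spec_is_adjacent_transposition; infer_instance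

-- ===== CLAIM (what is proved, stated in full; the proofs are below) =====
def Claim_equal_is_adjacent_transposition : Prop := ∀ (a : String) (b : String), Dom_is_adjacent_transposition a b → Spec_is_adjacent_transposition a b (is_adjacent_transposition a b)

-- ===== LEMMAS AND PROOFS =====

-- reductions of A's final pattern-match
theorem pvACheck_one (p : Int × Char × Char) : pvACheck [p] = false := by
  obtain ⟨i, x, y⟩ := p; rfl

theorem pvACheck_two (i1 : Int) (x1 y1 : Char) (i2 : Int) (x2 y2 : Char) :
    pvACheck [(i1, x1, y1), (i2, x2, y2)] = (i2 == i1 + 1 && x1 == y2 && x2 == y1) := rfl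

theorem pvACheck_three (p q r : Int × Char × Char) (rest : List (Int × Char × Char)) :
    pvACheck (p :: q :: r :: rest) = false := by
  obtain ⟨i1, x1, y1⟩ := p; obtain ⟨i2, x2, y2⟩ := q; obtain ⟨i3, x3, y3⟩ := r; rfl

-- reduction of B's single pass at a mismatch
theorem pvAltCore_mismatch (x y x2 y2 : Char) (xs2 ys2 : List Char) (hxy : x ≠ y) :
    pvAltCore (x :: x2 :: xs2) (y :: y2 :: ys2)
      = (x == y2 && x2 == y && xs2 == ys2) := by
  simp [pvAltCore, hxy, Bool.and_assoc]

-- a crossed check starting with the mismatching pair itself is always false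
theorem pv_cross_false (x y x2 : Char) (c : Bool) (hxy : x ≠ y) :
    (x == x2 && x2 == y && c) = false := by
  by_cases h1 : x = x2
  · subst h1; simp [fun h => hxy h]
  · simp [h1]

-- every surviving index of the filtered enumeration is ≥ the start index
theorem pv_filter_enum_idx_ge (l : List (Char × Char)) (s : Int)
    (p : Int × Char × Char)
    (hp : p ∈ (PySem.List.enumerate l s).filter (fun p => p.2.1 != p.2.2)) :
    s ≤ p.1 := by
  have hmem : p ∈ PySem.List.enumerate l s := List.mem_of_mem_filter hp
  rw [PySem.List.mem_enumerate_iff] at hmem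
  obtain ⟨k, hk, rfl⟩ := hmem
  simp

-- the filtered enumeration of the zip is empty iff the (equal-length) lists are equal
theorem pv_filter_enum_nil (xs : List Char) :
    ∀ (ys : List Char) (s : Int), xs.length = ys.length →
    (((PySem.List.enumerate (xs.zip ys) s).filter (fun p => p.2.1 != p.2.2)) = []
      ↔ xs = ys) := by
  induction xs with
  | nil =>
    intro ys s h
    cases ys with
    | nil => simp [PySem.List.enumerate_nil]
    | cons y ys => simp at h
  | cons x xs ih =>
    intro ys s h
    cases ys with
    | nil => simp at h
    | cons y ys =>
      have hlen : xs.length = ys.length := by simpa using h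
      simp only [List.zip_cons_cons, PySem.List.enumerate_cons, List.filter_cons]
      by_cases hxy : x = y
      · subst hxy
        simp only [bne_self_eq_false, Bool.false_eq_true, reduceIte]
        simpa using ih ys (s + 1) hlen
      · simp [hxy]

-- main invariant: A's check on the filtered enumeration equals B's single pass,
-- for any start index s
theorem pv_key (xs : List Char) :
    ∀ (ys : List Char) (s : Int), xs.length = ys.length →
    pvACheck ((PySem.List.enumerate (xs.zip ys) s).filter (fun p => p.2.1 != p.2.2))
      = pvAltCore xs ys := by
  induction xs with
  | nil =>
    intro ys s h
    cases ys with
    | nil => simp [PySem.List.enumerate_nil, pvACheck, pvAltCore]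
    | cons y ys => simp at h
  | cons x xs ih =>
    intro ys s h
    cases ys with
    | nil => simp at h
    | cons y ys =>
      have hlen : xs.length = ys.length := by simpa using h
      simp only [List.zip_cons_cons, PySem.List.enumerate_cons, List.filter_cons]
      by_cases hxy : x = y
      · subst hxy
        simp only [bne_self_eq_false, Bool.false_eq_true, reduceIte]
        rw [ih ys (s + 1) hlen]
        simp [pvAltCore]
      · simp only [bne_iff_ne, ne_eq, hxy, not_false_eq_true, if_true]
        cases xs with
        | nil =>
          cases ys with
          | nil => simp [PySem.List.enumerate_nil, pvACheck_one, pvAltCore]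
          | cons y2 ys => simp at hlen
        | cons x2 xs2 =>
          cases ys with
          | nil => simp at hlen
          | cons y2 ys2 =>
            have hlen2 : xs2.length = ys2.length := by simpa using hlen
            rw [pvAltCore_mismatch x y x2 y2 xs2 ys2 hxy]
            simp only [List.zip_cons_cons, PySem.List.enumerate_cons, List.filter_cons]
            by_cases h2 : x2 = y2
            · -- second pair equal: no diff at s+1 on A's side, crossing impossible on B's side
              subst h2
              simp only [bne_self_eq_false, Bool.false_eq_true, reduceIte]
              rw [pv_cross_false x y x2 (xs2 == ys2) hxy]
              rcases hrest : (PySem.List.enumerate (xs2.zip ys2) (s + 1 + 1)).filter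
                  (fun p => p.2.1 != p.2.2) with _ | ⟨q, rest2⟩
              · rw [hrest]; exact pvACheck_one _
              · have hq : s + 1 + 1 ≤ q.1 := by
                  apply pv_filter_enum_idx_ge (xs2.zip ys2) (s + 1 + 1)
                  rw [hrest]; exact List.mem_cons_self
                cases rest2 with
                | nil =>
                  obtain ⟨qi, qx, qy⟩ := q
                  rw [hrest, pvACheck_two]
                  have : (qi == s + 1) = false := by
                    simp only [beq_eq_false_iff_ne, ne_eq]
                    simp at hq; omega
                  simp [this]
                | cons r rest3 => rw [hrest]; exact pvACheck_three _ _ _ _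
            · -- second pair differs: crossing + empty remainder is exactly A's two-diff check
              simp only [bne_iff_ne, ne_eq, h2, not_false_eq_true, if_true]
              rcases hrest : (PySem.List.enumerate (xs2.zip ys2) (s + 1 + 1)).filter
                  (fun p => p.2.1 != p.2.2) with _ | ⟨q, rest2⟩
              · have hxs : xs2 = ys2 := (pv_filter_enum_nil xs2 ys2 (s + 1 + 1) hlen2).mp hrest
                rw [hrest, pvACheck_two, hxs]
                simp [Bool.and_comm]
              · have hne : xs2 ≠ ys2 := by
                  intro hcontra
                  have := (pv_filter_enum_nil xs2 ys2 (s + 1 + 1) hlen2).mpr hcontra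
                  rw [hrest] at this; exact absurd this (by simp)
                rw [hrest, pvACheck_three]
                simp [hne]

-- ===== VERDICT (by name: the statement is the Claim_ definition above) =====
theorem is_adjacent_transposition_spec : Claim_equal_is_adjacent_transposition := by
  intro a b _
  unfold Spec_is_adjacent_transposition is_adjacent_transposition is_adjacent_transposition_alt
  by_cases hlen : a.toList.length = b.toList.length
  · have hc : (a.toList.length != b.toList.length) = false := by simp [hlen]
    rw [hc]
    simp only [Bool.false_eq_true, if_false]
    exact pv_key a.toList b.toList 0 hlen
  · have hc : (a.toList.length != b.toList.length) = true := by simpa using hlen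
    rw [hc]
    simp
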